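-- pv_equiv track=rewrite | github.com/Sunghwan-DS/TIL | Python/Contest_and_Exam/2020_Liner_5.py | solution
-- ===== SOURCE A (Python) =====
-- def solution(dataSource, tags):
--     answer = []
--     arr = [[] for _ in range(len(tags) + 1)]
--
--     for data in dataSource:
--         cnt = 0
--         name = data[0]
--         for i in range(1, len(data)):
--             if data[i] in tags:
--                 cnt += 1
--         arr[cnt].append(name)
--
--     for i in range(len(tags), 0, -1):
--         arr[i].sort()
--         answer.extend(arr[i])
--         if len(answer) >= 10:
--             break
--
--     return answer[:10]
-- ===== SOURCE B (Python) =====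
-- def solution(dataSource, tags):
--     pairs = []
--     for data in dataSource:
--         cnt = len([t for t in data[1:] if t in tags])
--         if cnt > 0:
--             pairs.append((-cnt, data[0]))
--     pairs.sort()
--     return [name for _, name in pairs[:10]]
-- ===== Notes on version B (the rewrite author's own statement) =====
-- stated objective: simpler
-- what changed: Replaced A's bucket array indexed by match count (per-bucket in-place sorts plus a descending scan with an early break) by one flat list of (-count, name) pairs sorted once lexicographically and sliced to 10.
import Mathlib
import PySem

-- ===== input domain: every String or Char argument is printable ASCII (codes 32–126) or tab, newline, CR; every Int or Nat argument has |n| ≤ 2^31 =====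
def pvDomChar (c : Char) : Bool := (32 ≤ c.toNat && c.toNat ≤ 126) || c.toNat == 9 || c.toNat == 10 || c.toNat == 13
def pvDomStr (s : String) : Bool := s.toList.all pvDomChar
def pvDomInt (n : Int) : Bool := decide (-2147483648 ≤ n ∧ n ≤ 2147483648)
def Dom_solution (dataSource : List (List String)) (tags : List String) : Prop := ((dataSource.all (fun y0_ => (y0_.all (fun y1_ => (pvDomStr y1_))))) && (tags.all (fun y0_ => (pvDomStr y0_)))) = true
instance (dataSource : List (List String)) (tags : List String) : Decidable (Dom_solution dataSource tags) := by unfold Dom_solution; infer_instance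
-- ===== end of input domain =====

-- B replaces A's count-indexed bucket array (per-bucket sorts, descending scan with break)
-- by one flat (-count, name) pair list sorted once lexicographically; objective: simpler.
-- Equivalence is about the return value only (A sorts its internal buckets in place).

-- ===== PORT A =====
def solution (dataSource : List (List String)) (tags : List String) : List String :=
  let arr0 : List (List String) := (List.range (tags.length + 1)).map (fun _ => ([] : List String))
  let arr := dataSource.foldl (fun arr data =>
    let cnt : Int := (PySem.List.pyRange 1 (PySem.List.len data)).foldl
        (fun cnt i => if tags.contains (PySem.List.pyGetD data i "") then cnt + 1 else cnt) 0
    let name := PySem.List.pyGetD data 0 ""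
    PySem.List.pySetD arr cnt (PySem.List.pyGetD arr cnt [] ++ [name])) arr0
  let answer := ((PySem.List.pyRange (PySem.List.len tags) 0 (-1)).foldl
      (fun st i =>
        if st.2 then st else
        let ans := st.1 ++ PySem.List.sorted (PySem.List.pyGetD arr i []) (fun x => x)
        (ans, decide (10 ≤ ans.length))) (([] : List String), false)).1
  PySem.List.slice answer none (some 10)

-- ===== PORT B =====
def solution_alt (dataSource : List (List String)) (tags : List String) : List String :=
  let pairs : List (Int × String) := dataSource.foldl (fun acc data =>
    let cnt : Nat := (PySem.List.slice data (some 1)).countP (fun t => tags.contains t)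
    if 0 < cnt then acc ++ [(-(cnt : Int), PySem.List.pyGetD data 0 "")] else acc) []
  let sp := PySem.List.sorted2 pairs (fun p => p.1) (fun p => p.2)
  (PySem.List.slice sp none (some 10)).map (fun p => p.2)

-- ===== PRECONDITION & SPEC =====
-- Pre_ excludes exactly the inputs where Python A raises IndexError: an empty entry
-- (data[0]), or an entry whose matched-tag count exceeds len(tags) (arr[cnt]).
def Pre_solution (dataSource : List (List String)) (tags : List String) : Prop :=
  ∀ d ∈ dataSource, d ≠ [] ∧ (d.drop 1).countP (fun t => tags.contains t) ≤ tags.length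
instance (dataSource : List (List String)) (tags : List String) : Decidable (Pre_solution dataSource tags) := by unfold Pre_solution; infer_instance

def pvWitness_solution : List (List String) × List String :=
  ([["a", "t1"], ["b", "t1", "t2"], ["c"]], ["t1", "t2"])

def Spec_solution (dataSource : List (List String)) (tags : List String) (out : List String) : Prop := out = solution_alt dataSource tags
instance (dataSource : List (List String)) (tags : List String) (out : List String) : Decidable (Spec_solution dataSource tags out) := by unfold Spec_solution; infer_instance

-- ===== CLAIM (what is proved, stated in full; the proofs are below) =====
def Claim_equal_solution : Prop := ∀ (dataSource : List (List String)) (tags : List String), Dom_solution dataSource tags → Pre_solution dataSource tags → Spec_solution dataSource tags (solution dataSource tags)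

-- ===== LEMMAS AND PROOFS =====

-- the matched-tag count of one entry
def pvCnt (tags d : List String) : Nat := (d.drop 1).countP (fun t => tags.contains t)
-- the (-count, name) pair B builds for one entry
def pvPair (tags : List String) (d : List String) : Int × String :=
  (-(pvCnt tags d : Int), PySem.List.pyGetD d 0 "")
-- names of the entries with exactly i matches, in dataSource order (A's bucket i)
def pvBucket (ds : List (List String)) (tags : List String) (i : Nat) : List String := ((ds.filter (fun d => pvCnt tags d == i)).map (fun d => PySem.List.pyGetD d 0 ""))


-- B's pair list: entries with a positive match count, in order
def pvP (ds : List (List String)) (tags : List String) : List (Int × String) :=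
  (ds.filter (fun d => decide (0 < pvCnt tags d))).map (pvPair tags)
-- descending concatenation of the sorted buckets, as pairs
def pvL (ds : List (List String)) (tags : List String) : List (Int × String) :=
  (List.range tags.length).flatMap (fun k =>
    (PySem.List.sorted (pvBucket ds tags (tags.length - k)) (fun x => x)).map
      (fun nm => ((-(tags.length - k : Nat) : Int), nm)))

def pvLtB (a b : Int × String) : Bool :=
  decide (a.1 < b.1) || (!decide (b.1 < a.1) && decide (a.2 < b.2))

lemma pvLtB_iff (a b : Int × String) : pvLtB a b = true ↔ toLex a < toLex b := by
  simp only [pvLtB, Prod.Lex.lt_iff, Bool.or_eq_true, Bool.and_eq_true, Bool.not_eq_true',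
    decide_eq_true_eq, decide_eq_false_iff_not, ofLex_toLex]
  constructor
  · rintro (h | ⟨h1, h2⟩)
    · exact Or.inl h
    · rcases lt_trichotomy a.1 b.1 with h' | h' | h'
      · exact Or.inl h'
      · exact Or.inr ⟨h', h2⟩
      · exact absurd h' h1
  · rintro (h | ⟨h1, h2⟩)
    · exact Or.inl h
    · exact Or.inr ⟨by omega, h2⟩

lemma pv_insertBy_pairwise (x : Int × String) :
    ∀ ys : List (Int × String), ys.Pairwise (fun a b => toLex a ≤ toLex b) →
      (PySem.List.insertBy pvLtB x ys).Pairwise (fun a b => toLex a ≤ toLex b) := by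
  intro ys
  induction ys with
  | nil => intro _; simp [PySem.List.insertBy]
  | cons y ys ih =>
    intro h
    rw [List.pairwise_cons] at h
    obtain ⟨hy, hys⟩ := h
    by_cases hb : pvLtB x y = true
    · show ((if pvLtB x y then x :: y :: ys else y :: PySem.List.insertBy pvLtB x ys) : List _).Pairwise _
      rw [if_pos hb]
      have hxy : toLex x < toLex y := (pvLtB_iff x y).1 hb
      refine List.Pairwise.cons ?_ (List.Pairwise.cons hy hys)
      intro z hz
      rcases List.mem_cons.1 hz with rfl | hz
      · exact le_of_lt hxy
      · exact le_trans (le_of_lt hxy) (hy z hz)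
    · show ((if pvLtB x y then x :: y :: ys else y :: PySem.List.insertBy pvLtB x ys) : List _).Pairwise _
      rw [if_neg hb]
      refine List.Pairwise.cons ?_ (ih hys)
      intro z hz
      rw [PySem.List.mem_insertBy] at hz
      rcases hz with rfl | hz
      · exact le_of_not_gt (fun h => hb ((pvLtB_iff z y).2 h))
      · exact hy z hz

lemma pv_foldl_insertBy_pairwise :
    ∀ (xs acc : List (Int × String)), acc.Pairwise (fun a b => toLex a ≤ toLex b) →
      (xs.foldl (fun acc x => PySem.List.insertBy pvLtB x acc) acc).Pairwise
        (fun a b => toLex a ≤ toLex b) := by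
  intro xs
  induction xs with
  | nil => intro acc h; exact h
  | cons x xs ih => intro acc h; exact ih _ (pv_insertBy_pairwise x acc h)

lemma pv_sorted2_eq_foldl (xs : List (Int × String)) :
    PySem.List.sorted2 xs (fun p => p.1) (fun p => p.2) =
      xs.foldl (fun acc x => PySem.List.insertBy pvLtB x acc) [] := rfl


lemma pv_flatMap_perm {a b : Type} (l : List a) (f g : a -> List b)
    (h : forall x, x ∈ l -> (f x).Perm (g x)) : (l.flatMap f).Perm (l.flatMap g) := by
  induction l with
  | nil => simp
  | cons x xs ih =>
    simp only [List.flatMap_cons]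
    exact (h x (by simp)).append (ih (fun y hy => h y (List.mem_cons_of_mem x hy)))

lemma pv_perm_flatMap_filter {a k : Type} [DecidableEq k] :
    ∀ (ks : List k) (l : List a) (key : a -> k), ks.Nodup -> (∀ x ∈ l, key x ∈ ks) ->
      (ks.flatMap (fun c => l.filter (fun x => key x == c))).Perm l := by
  intro ks
  induction ks with
  | nil =>
    intro l key _ hcov
    have : l = [] := List.eq_nil_iff_forall_not_mem.2 (fun x hx => by simpa using hcov x hx)
    simp [this]
  | cons c ks ih =>
    intro l key hnd hcov
    rw [List.nodup_cons] at hnd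
    simp only [List.flatMap_cons]
    have hrest : (ks.flatMap (fun c' => l.filter (fun x => key x == c'))) =
        (ks.flatMap (fun c' => (l.filter (fun x => !(key x == c))).filter (fun x => key x == c'))) := by
      apply List.flatMap_congr
      intro c' hc'
      rw [List.filter_filter]
      apply List.filter_congr
      intro x _
      by_cases h : key x = c'
      · have hne : c' ≠ c := by rintro rfl; exact hnd.1 hc'
        simp [h, hne]
      · simp [h]
    rw [hrest]
    have hperm := ih (l.filter (fun x => !(key x == c))) key hnd.2 (fun x hx => by
      have hx' := List.mem_of_mem_filter hx
      have hne : key x ≠ c := by simpa using List.of_mem_filter hx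
      rcases List.mem_cons.1 (hcov x hx') with h | h
      · exact absurd h hne
      · exact h)
    exact (hperm.append_left _).trans (List.filter_append_perm _ l)


lemma pv_group_eq (ds : List (List String)) (tags : List String) (i : Nat) (hi : 1 ≤ i) :
    (pvP ds tags).filter (fun p => p.1 == (-(i : Nat) : Int)) =
      (pvBucket ds tags i).map (fun nm => ((-(i : Nat) : Int), nm)) := by
  unfold pvP pvBucket
  rw [List.filter_map, List.filter_filter]
  have hpred : ∀ d ∈ ds, (((fun p : Int × String => p.1 == (-(i:Nat) : Int)) ∘ pvPair tags) d
      && decide (0 < pvCnt tags d)) = (pvCnt tags d == i) := by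
    intro d _
    simp only [Function.comp, pvPair]
    by_cases h : pvCnt tags d = i
    · simp [h]; omega
    · have hne : ¬ ((-(pvCnt tags d : Int)) = -(i : Nat)) := by omega
      rw [beq_eq_false_iff_ne.2 hne, beq_eq_false_iff_ne.2 h, Bool.false_and]
  rw [List.filter_congr hpred, List.map_map]
  apply List.map_congr_left
  intro d hd
  have : pvCnt tags d = i := by simpa using List.of_mem_filter hd
  simp [Function.comp, pvPair, this]

lemma pv_L_perm_P (ds : List (List String)) (tags : List String)
    (hpre : Pre_solution ds tags) : (pvL ds tags).Perm (pvP ds tags) := by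
  have h1 : (pvL ds tags).Perm ((List.range tags.length).flatMap (fun k =>
      (pvBucket ds tags (tags.length - k)).map
        (fun nm => ((-(tags.length - k : Nat) : Int), nm)))) := by
    apply pv_flatMap_perm
    intro k _
    exact (PySem.List.sorted_perm _ _ _).map _
  have h2 : ∀ k ∈ List.range tags.length,
      (pvBucket ds tags (tags.length - k)).map
        (fun nm => ((-(tags.length - k : Nat) : Int), nm)) =
      (pvP ds tags).filter (fun p => p.1 == (-(tags.length - k : Nat) : Int)) := by
    intro k hk
    rw [List.mem_range] at hk
    exact (pv_group_eq ds tags (tags.length - k) (by omega)).symm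
  rw [List.flatMap_congr h2] at h1
  have h3 : ((List.range tags.length).flatMap (fun k =>
      (pvP ds tags).filter (fun p => p.1 == (-(tags.length - k : Nat) : Int)))) =
      (((List.range tags.length).map (fun k => (-(tags.length - k : Nat) : Int))).flatMap
        (fun c => (pvP ds tags).filter (fun p => p.1 == c))) := by
    rw [List.flatMap_map]
  rw [h3] at h1
  refine h1.trans (pv_perm_flatMap_filter _ (pvP ds tags) (fun p : Int × String => p.1) ?_ ?_)
  · refine List.Nodup.map_on ?_ List.nodup_range
    intro x hx y hy hxy
    rw [List.mem_range] at hx hy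
    omega
  · intro p hp
    unfold pvP at hp
    rcases List.mem_map.1 hp with ⟨d, hd, rfl⟩
    have h0 : 0 < pvCnt tags d := by simpa using List.of_mem_filter hd
    have hle : pvCnt tags d ≤ tags.length := (hpre d (List.mem_of_mem_filter hd)).2
    refine List.mem_map.2 ⟨tags.length - pvCnt tags d, List.mem_range.2 (by omega), ?_⟩
    simp only [pvPair]
    congr 1
    omega

lemma pv_L_pairwise (ds : List (List String)) (tags : List String) :
    (pvL ds tags).Pairwise (fun a b => toLex a ≤ toLex b) := by
  unfold pvL
  rw [List.pairwise_flatMap]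
  constructor
  · intro k _
    rw [List.pairwise_map]
    refine (PySem.List.sorted_pairwise _ _).imp ?_
    intro a b hab
    rw [Prod.Lex.le_iff]
    exact Or.inr ⟨rfl, hab⟩
  · rw [List.pairwise_iff_getElem]
    intro i j hi hj hij x hx y hy
    simp only [List.length_range] at hi hj
    rcases List.mem_map.1 (by simpa using hx) with ⟨nx, _, rfl⟩
    rcases List.mem_map.1 (by simpa using hy) with ⟨ny, _, rfl⟩
    rw [Prod.Lex.le_iff]
    left
    simp only [ofLex_toLex]
    omega

lemma pv_sorted2_eq_L (ds : List (List String)) (tags : List String)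
    (hpre : Pre_solution ds tags) :
    PySem.List.sorted2 (pvP ds tags) (fun p => p.1) (fun p => p.2) = pvL ds tags := by
  apply PySem.List.eq_of_perm_of_pairwise_le_of_injective (fun p : Int × String => toLex p)
    (toLex.injective)
  · exact ((PySem.List.sorted2_perm _ _ _ _).trans (pv_L_perm_P ds tags hpre).symm)
  · rw [pv_sorted2_eq_foldl]
    exact pv_foldl_insertBy_pairwise _ _ (List.Pairwise.nil)
  · exact pv_L_pairwise ds tags


lemma pv_cnt_eq (tags data : List String) :
    ((PySem.List.pyRange 1 (PySem.List.len data)).foldl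
      (fun cnt i => if tags.contains (PySem.List.pyGetD data i "") then cnt + 1 else cnt)
      (0 : Int))
    = (pvCnt tags data : Int) := by
  rw [PySem.List.foldl_pyRange_pyGetD data ""
      (fun acc t => if tags.contains t then acc + 1 else acc) 0 (by norm_num)]
  rw [PySem.List.foldl_if_add_one]
  unfold pvCnt
  rw [List.drop_one]
  norm_num
  apply List.countP_congr
  intro t _
  simp

lemma pv_arr0_getD (n i : Nat) :
    ((List.range (n+1)).map (fun _ => ([] : List String))).getD i [] = [] := by
  rw [List.getD_eq_getElem?_getD, List.getElem?_map]
  cases (List.range (n+1))[i]? <;> simp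

lemma pv_arr_loop (tags : List String) :
    ∀ (ds : List (List String)) (arr : List (List String)),
      (∀ d ∈ ds, pvCnt tags d ≤ tags.length) → arr.length = tags.length + 1 →
      (ds.foldl (fun arr data =>
          PySem.List.pySetD arr ((pvCnt tags data : Nat) : Int)
            (PySem.List.pyGetD arr ((pvCnt tags data : Nat) : Int) []
              ++ [PySem.List.pyGetD data 0 ""])) arr).length = tags.length + 1 ∧
      ∀ i : Nat, (ds.foldl (fun arr data =>
          PySem.List.pySetD arr ((pvCnt tags data : Nat) : Int)
            (PySem.List.pyGetD arr ((pvCnt tags data : Nat) : Int) []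
              ++ [PySem.List.pyGetD data 0 ""])) arr).getD i []
        = arr.getD i [] ++ pvBucket ds tags i := by
  intro ds
  induction ds with
  | nil =>
    intro arr _ hlen
    exact ⟨hlen, fun i => by simp [pvBucket]⟩
  | cons d ds ih =>
    intro arr hpre hlen
    simp only [List.foldl_cons]
    have hc : pvCnt tags d < arr.length := by
      have := hpre d (by simp); omega
    have hstep : PySem.List.pySetD arr ((pvCnt tags d : Nat) : Int)
        (PySem.List.pyGetD arr ((pvCnt tags d : Nat) : Int) [] ++ [PySem.List.pyGetD d 0 ""])
        = arr.set (pvCnt tags d)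
            (arr.getD (pvCnt tags d) [] ++ [PySem.List.pyGetD d 0 ""]) := by
      rw [PySem.List.pySetD_natCast arr (pvCnt tags d)
          (PySem.List.pyGetD arr ((pvCnt tags d : Nat) : Int) [] ++ [PySem.List.pyGetD d 0 ""]),
        PySem.List.pyGetD_natCast arr (pvCnt tags d) []]
    rw [hstep]
    obtain ⟨hL, hG⟩ := ih (arr.set (pvCnt tags d)
        (arr.getD (pvCnt tags d) [] ++ [PySem.List.pyGetD d 0 ""]))
      (fun x hx => hpre x (List.mem_cons_of_mem _ hx))
      (by rw [List.length_set]; exact hlen)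
    refine ⟨hL, fun i => ?_⟩
    rw [hG i]
    have hset : (arr.set (pvCnt tags d)
        (arr.getD (pvCnt tags d) [] ++ [PySem.List.pyGetD d 0 ""])).getD i []
        = if pvCnt tags d = i then arr.getD (pvCnt tags d) [] ++ [PySem.List.pyGetD d 0 ""]
          else arr.getD i [] := by
      rw [List.getD_eq_getElem?_getD, List.getElem?_set]
      by_cases h : pvCnt tags d = i
      · rw [if_pos h, if_pos hc, if_pos h]; rfl
      · rw [if_neg h, if_neg h, ← List.getD_eq_getElem?_getD]
    rw [hset]
    have hbucket : pvBucket (d :: ds) tags i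
        = (if pvCnt tags d = i then [PySem.List.pyGetD d 0 ""] else []) ++ pvBucket ds tags i := by
      unfold pvBucket
      rw [List.filter_cons]
      by_cases h : pvCnt tags d = i
      · rw [if_pos (by simp [h]), if_pos h]; simp
      · rw [if_neg (by simp [h]), if_neg h]; simp
    rw [hbucket]
    by_cases h : pvCnt tags d = i
    · rw [if_pos h, if_pos h, h, List.append_assoc]
    · rw [if_neg h, if_neg h, List.nil_append]

lemma pv_pyRange_desc (n : Nat) :
    PySem.List.pyRange (n : Int) 0 (-1) = (List.range n).map (fun k => ((n - k : Nat) : Int)) := by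
  rcases Nat.eq_zero_or_pos n with rfl | hn
  · simp [PySem.List.pyRange]
  · have h0 : (0:Int) < (n:Int) := by exact_mod_cast hn
    simp only [PySem.List.pyRange, if_neg (by norm_num : ¬((-1:Int) = 0)),
      if_neg (by norm_num : ¬((0:Int) < -1)), if_pos h0]
    have hcount : ((((n:Int) - 0 + -(-1) - 1) / -(-1)).toNat) = n := by norm_num
    rw [hcount]
    apply List.map_congr_left
    intro k hk
    rw [List.mem_range] at hk
    omega

lemma pv_foldl_stay (g : Int → List String) :
    ∀ (l : List Int) (st : List String × Bool), st.2 = true →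
      l.foldl (fun st i => if st.2 then st else
        ((st.1 ++ g i), decide (10 ≤ (st.1 ++ g i).length))) st = st := by
  intro l
  induction l with
  | nil => intro st h; rfl
  | cons i l ih =>
    intro st h
    simp only [List.foldl_cons, if_pos h]
    exact ih st h

lemma pv_break_take (g : Int → List String) :
    ∀ (l : List Int) (ans : List String),
      ((l.foldl (fun st i => if st.2 then st else
          ((st.1 ++ g i), decide (10 ≤ (st.1 ++ g i).length)))
          (ans, decide (10 ≤ ans.length))).1).take 10
      = (ans ++ l.flatMap g).take 10 := by
  intro l
  induction l with
  | nil => intro ans; simp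
  | cons i l ih =>
    intro ans
    simp only [List.foldl_cons, List.flatMap_cons]
    by_cases h : 10 ≤ ans.length
    · rw [if_pos (by simp [h]), pv_foldl_stay g l _ (by simp [h]),
        List.take_append_of_le_length h]
    · rw [if_neg (by simp [h])]
      have := ih (ans ++ g i)
      rw [List.append_assoc] at this
      exact this


lemma pv_A_eq (ds : List (List String)) (tags : List String) (hpre : Pre_solution ds tags) :
    solution ds tags = ((List.range tags.length).flatMap (fun k =>
      PySem.List.sorted (pvBucket ds tags (tags.length - k)) (fun x => x))).take 10 := by
  simp only [solution]
  have hfun : (fun (arr : List (List String)) (data : List String) =>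
      PySem.List.pySetD arr ((PySem.List.pyRange 1 (PySem.List.len data)).foldl
          (fun cnt i => if tags.contains (PySem.List.pyGetD data i "") then cnt + 1 else cnt) 0)
        (PySem.List.pyGetD arr ((PySem.List.pyRange 1 (PySem.List.len data)).foldl
          (fun cnt i => if tags.contains (PySem.List.pyGetD data i "") then cnt + 1 else cnt) 0) []
          ++ [PySem.List.pyGetD data 0 ""]))
    = (fun arr data => PySem.List.pySetD arr ((pvCnt tags data : Nat) : Int)
        (PySem.List.pyGetD arr ((pvCnt tags data : Nat) : Int) []
          ++ [PySem.List.pyGetD data 0 ""])) := by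
    funext arr data
    rw [pv_cnt_eq]
  rw [hfun]
  obtain ⟨hL, hG⟩ := pv_arr_loop tags ds ((List.range (tags.length + 1)).map (fun _ => ([] : List String)))
    (fun d hd => (hpre d hd).2) (by simp)
  rw [PySem.List.len_eq, pv_pyRange_desc]
  have hinit : ((([] : List String), false) : List String × Bool)
      = (([] : List String), decide (10 ≤ ([] : List String).length)) := rfl
  rw [hinit, PySem.List.slice_to _ (by norm_num : (0:Int) ≤ (10:Int)),
    show ((10:Int)).toNat = 10 from rfl, pv_break_take, List.nil_append, List.flatMap_map]
  congr 1
  apply List.flatMap_congr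
  intro k hk
  rw [PySem.List.pyGetD_natCast, hG (tags.length - k), pv_arr0_getD, List.nil_append]

lemma pv_B_eq (ds : List (List String)) (tags : List String) (hpre : Pre_solution ds tags) :
    solution_alt ds tags = ((pvL ds tags).take 10).map (fun p => p.2) := by
  simp only [solution_alt]
  have hfun : (fun (acc : List (Int × String)) (data : List String) =>
      if 0 < (PySem.List.slice data (some 1)).countP (fun t => tags.contains t) then
        acc ++ [((-((PySem.List.slice data (some 1)).countP (fun t => tags.contains t) : Int),
          PySem.List.pyGetD data 0 ""))]
      else acc)
    = (fun acc data => if (fun d => decide (0 < pvCnt tags d)) data = true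
        then acc ++ [pvPair tags data] else acc) := by
    funext acc data
    simp only [PySem.List.slice_from_one, ← List.drop_one, pvPair, pvCnt, decide_eq_true_eq]
  rw [hfun, PySem.List.foldl_append_if, List.nil_append]
  rw [show ((ds.filter (fun d => decide (0 < pvCnt tags d))).map (pvPair tags)) = pvP ds tags from rfl]
  rw [pv_sorted2_eq_L ds tags hpre]
  rw [PySem.List.slice_to _ (by norm_num : (0:Int) ≤ (10:Int)),
    show ((10:Int)).toNat = 10 from rfl]

theorem solution_spec : Claim_equal_solution := by
  intro ds tags _ hpre
  unfold Spec_solution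
  rw [pv_A_eq ds tags hpre, pv_B_eq ds tags hpre]
  rw [List.map_take]
  congr 1
  unfold pvL
  rw [List.map_flatMap]
  apply List.flatMap_congr
  intro k hk
  rw [List.map_map]
  simp
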